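-- pv_equiv track=rewrite | github.com/beiller/sheetmusictabs | sheetmusictabs/views.py | inject_adsense
-- ===== SOURCE A (Python) =====
-- def inject_adsense(tab, ad_code, insert_after=3):
--     """
--     This function will inject adsense ad in between lines
--     of the tab. Returns the string
--
--     Keyword arguments:
--     tab -- string representing the tab
--     """
--     occur = 0
--     output = ''
--     done = False
--     for line in tab.split('\n'):
--         if done is False and line.strip() == '':
--             occur += 1
--
--         if done is False and occur > insert_after:
--             output += ad_code + "\n"
--             done = True
--         output += line + "\n"
--     return output
-- ===== SOURCE B (Python) =====
-- def inject_adsense(tab, ad_code, insert_after=3):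
--     lines = tab.split('\n')
--     blanks = 0
--     idx = None
--     for i, line in enumerate(lines):
--         if line.strip() == '':
--             blanks += 1
--         if blanks > insert_after:
--             idx = i
--             break
--     if idx is not None:
--         lines.insert(idx, ad_code)
--     return '\n'.join(lines) + '\n'
-- ===== Notes on version B (the rewrite author's own statement) =====
-- stated objective: simpler
-- what changed: A threads a done-flag through one string-concatenation loop that both counts blanks and rebuilds the text; B splits once, scans with enumerate to locate the first index where the blank count exceeds insert_after (breaking there), splices the ad line into the list with list.insert, and joins.
import Mathlib
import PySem

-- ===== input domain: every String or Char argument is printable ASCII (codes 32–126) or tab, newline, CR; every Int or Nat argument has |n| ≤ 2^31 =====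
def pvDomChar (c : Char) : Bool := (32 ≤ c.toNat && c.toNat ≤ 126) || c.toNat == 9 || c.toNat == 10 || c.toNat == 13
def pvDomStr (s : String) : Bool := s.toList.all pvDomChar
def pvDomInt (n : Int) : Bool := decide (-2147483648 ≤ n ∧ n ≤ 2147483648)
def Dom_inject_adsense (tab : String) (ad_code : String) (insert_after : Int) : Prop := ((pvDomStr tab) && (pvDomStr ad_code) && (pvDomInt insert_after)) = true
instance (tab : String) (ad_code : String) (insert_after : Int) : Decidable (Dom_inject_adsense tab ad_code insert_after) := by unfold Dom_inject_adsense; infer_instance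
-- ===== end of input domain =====

-- B replaces A's flag-threaded string-concatenation pass by a locate-index / splice-into-list / join pipeline (objective: simpler).

-- ===== PORT A =====
-- one iteration of A's loop body over the state (occur, output, done)
def pvStepA (ad_code : String) (insert_after : Int)
    (st : Int × String × Bool) (line : String) : Int × String × Bool :=
  let occur := if st.2.2 = false ∧ PySem.Str.strip line = "" then st.1 + 1 else st.1
  if st.2.2 = false ∧ occur > insert_after then
    (occur, st.2.1 ++ ad_code ++ "\n" ++ line ++ "\n", true)
  else
    (occur, st.2.1 ++ line ++ "\n", st.2.2)

def inject_adsense (tab : String) (ad_code : String) (insert_after : Int) : String :=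
  -- tab.split('\n'); split? is none only for an empty separator, so getD never fires
  let lines := (PySem.Str.split? tab "\n").getD []
  (lines.foldl (pvStepA ad_code insert_after) (0, "", false)).2.1

-- ===== PORT B =====
-- the enumerate-and-break scan of Source B: index of the line where the blank count first exceeds insert_after
def pvLocate (insert_after : Int) : List String → Int → Option Nat
  | [], _ => none
  | line :: rest, blanks =>
    let blanks := if PySem.Str.strip line = "" then blanks + 1 else blanks
    if blanks > insert_after then some 0
    else (pvLocate insert_after rest blanks).map (· + 1)

def inject_adsense_alt (tab : String) (ad_code : String) (insert_after : Int) : String :=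
  let lines := (PySem.Str.split? tab "\n").getD []
  let lines' := match pvLocate insert_after lines 0 with
    | some i => PySem.List.insert lines (i : Int) ad_code
    | none => lines
  PySem.Str.join "\n" lines' ++ "\n"

-- ===== PRECONDITION & SPEC =====
def Spec_inject_adsense (tab : String) (ad_code : String) (insert_after : Int) (out : String) : Prop := out = inject_adsense_alt tab ad_code insert_after
instance (tab : String) (ad_code : String) (insert_after : Int) (out : String) : Decidable (Spec_inject_adsense tab ad_code insert_after out) := by unfold Spec_inject_adsense; infer_instance

-- ===== CLAIM (what is proved, stated in full; the proofs are below) =====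
def Claim_equal_inject_adsense : Prop := ∀ (tab : String) (ad_code : String) (insert_after : Int), Dom_inject_adsense tab ad_code insert_after → Spec_inject_adsense tab ad_code insert_after (inject_adsense tab ad_code insert_after)

-- ===== LEMMAS AND PROOFS =====

-- proof-side helper: A's unconditional tail "output += line + '\n'" over a list of lines
def pvCat (out : String) (ls : List String) : String :=
  ls.foldl (fun o l => o ++ l ++ "\n") out

theorem pvLocate_lt_length (ia : Int) (ls : List String) (b : Int) (i : Nat)
    (h : pvLocate ia ls b = some i) : i < ls.length := by
  induction ls generalizing b i with
  | nil => simp [pvLocate] at h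
  | cons l rest ih =>
    rw [pvLocate] at h
    split at h <;> split at h <;>
      first
        | (cases h; simp)
        | (obtain ⟨j, hj, rfl⟩ := Option.map_eq_some_iff.mp h
           simpa using Nat.succ_lt_succ (ih _ _ hj))

-- once done = true, A's loop only appends line + "\n"
theorem pvFold_done (ad_code : String) (ia : Int) (ls : List String) (occur : Int) (out : String) :
    ls.foldl (pvStepA ad_code ia) (occur, out, true) = (occur, pvCat out ls, true) := by
  induction ls generalizing out with
  | nil => rfl
  | cons l rest ih => simpa [pvStepA, pvCat] using ih (out ++ l ++ "\n")

-- A's loop from a not-yet-done state = pvCat of the lines with ad_code spliced at pvLocate's index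
theorem pvFold_main (ad_code : String) (ia : Int) (ls : List String) (occur : Int) (out : String) :
    (ls.foldl (pvStepA ad_code ia) (occur, out, false)).2.1 =
      (match pvLocate ia ls occur with
       | some i => pvCat out (ls.insertIdx i ad_code)
       | none => pvCat out ls) := by
  induction ls generalizing occur out with
  | nil => rfl
  | cons l rest ih =>
    rw [pvLocate]
    by_cases hb : PySem.Str.strip l = "" <;>
    · simp only [hb, if_true, if_false]
      by_cases hgt : (if PySem.Str.strip l = "" then occur + 1 else occur) > ia
      all_goals
        rw [List.foldl_cons]
        simp only [pvStepA, hb, if_true, if_false, and_true, and_false, true_and]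
      · -- trigger case
        split_ifs at hgt ⊢ <;> try omega
        all_goals simp_all [pvFold_done, pvCat, List.insertIdx]
      · split_ifs at hgt ⊢ <;> try omega
        all_goals
          rw [ih]
          cases hres : pvLocate ia rest (if PySem.Str.strip l = "" then occur + 1 else occur) <;>
            simp_all [pvCat, List.insertIdx_succ_cons]

-- pvCat of a nonempty line list is '\n'.join(lines) + '\n'
theorem pvCat_join (l : String) (rest : List String) (out : String) :
    pvCat out (l :: rest) = out ++ PySem.Str.join "\n" (l :: rest) ++ "\n" := by
  induction rest generalizing l out with
  | nil =>
    apply String.toList_inj.mp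
    simp [pvCat, PySem.Str.toList_join, PySem.Chars.join_singleton]
  | cons q rest ih =>
    have h1 : pvCat out (l :: q :: rest) = pvCat (out ++ l ++ "\n") (q :: rest) := rfl
    rw [h1, ih]
    apply String.toList_inj.mp
    simp [PySem.Str.toList_join, PySem.Chars.join_cons_cons]

theorem pvInsertIdx_eq {α : Type} (xs : List α) (i : Nat) (a : α) (h : i ≤ xs.length) :
    List.take i xs ++ a :: List.drop i xs = xs.insertIdx i a := by
  induction xs generalizing i with
  | nil => obtain rfl := Nat.le_zero.mp h; rfl
  | cons x xs ih =>
    cases i with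
    | zero => rfl
    | succ j => simpa [List.insertIdx_succ_cons] using ih j (by simpa using h)

-- the result of splitOn.go is never the empty list
theorem pvSplitGo_ne_nil (sep : List Char) (fuel : Nat) (l cur : List Char) (acc : List (List Char)) :
    PySem.Chars.splitOn.go sep fuel l cur acc ≠ [] := by
  induction fuel generalizing l cur acc with
  | zero => simp [PySem.Chars.splitOn.go]
  | succ n ih =>
    cases l with
    | nil => simp [PySem.Chars.splitOn.go]
    | cons c rest =>
      rw [PySem.Chars.splitOn.go]
      split
      · exact ih _ _ _
      · exact ih _ _ _

theorem pvSplit_ne_nil (tab : String) : (PySem.Str.split? tab "\n").getD [] ≠ [] := by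
  have h : PySem.Str.split? tab "\n" =
      some ((PySem.Chars.splitOn tab.toList "\n".toList).map String.ofList) := by
    simp [PySem.Str.split?, PySem.Chars.split?]
  rw [h]
  intro hc
  simp only [Option.getD_some, List.map_eq_nil_iff] at hc
  exact pvSplitGo_ne_nil _ _ _ _ _ hc

-- ===== VERDICT (by name: the statement is the Claim_ definition above) =====
theorem inject_adsense_spec : Claim_equal_inject_adsense := by
  intro tab ad_code ia _
  unfold Spec_inject_adsense
  simp only [inject_adsense, inject_adsense_alt]
  have hne := pvSplit_ne_nil tab
  generalize hl : (PySem.Str.split? tab "\n").getD [] = lines at hne ⊢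
  rw [pvFold_main]
  cases hres : pvLocate ia lines 0 with
  | none =>
    simp only []
    obtain ⟨l, rest, rfl⟩ := List.exists_cons_of_ne_nil hne
    rw [pvCat_join]
    apply String.toList_inj.mp
    simp
  | some i =>
    simp only []
    have hlt : i < lines.length := pvLocate_lt_length ia lines 0 i hres
    rw [PySem.List.insert_natCast lines i ad_code (le_of_lt hlt)]
    rw [pvInsertIdx_eq lines i ad_code (le_of_lt hlt)]
    have hne' : lines.insertIdx i ad_code ≠ [] := by
      intro hc
      have := congrArg List.length hc
      simp [List.length_insertIdx, if_pos (le_of_lt hlt)] at this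
    obtain ⟨l, rest, he⟩ := List.exists_cons_of_ne_nil hne'
    rw [he, pvCat_join]
    apply String.toList_inj.mp
    simp
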